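-- pv_equiv track=rewrite | github.com/guangchen811/tadv | scripts/python/evaluation/for_e4s10_sql.py | build_validation_results_dict
-- ===== SOURCE A (Python) =====
-- def build_validation_results_dict(code_list_for_constraints, status_on_clean_test_data, valid_code_column_map):
--     code_status_map = {code_list_for_constraints[i]: status_on_clean_test_data[i] for i in
--                        range(len(code_list_for_constraints))}
--     validation_results_dict = {"results": {column: {"code": []} for column in valid_code_column_map.values()}}
--     for code, column in valid_code_column_map.items():
--         validation_results_dict["results"][column]["code"].append(
--             [code, "Passed" if code_status_map[code] == "Success" else "Failed"])
--     return validation_results_dict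
-- ===== SOURCE B (Python) =====
-- def build_validation_results_dict(code_list_for_constraints, status_on_clean_test_data, valid_code_column_map):
--     code_status_map = dict(zip(code_list_for_constraints, status_on_clean_test_data))
--     columns = []
--     for column in valid_code_column_map.values():
--         if column not in columns:
--             columns.append(column)
--     return {"results": {
--         column: {"code": [
--             [code, "Passed" if code_status_map[code] == "Success" else "Failed"]
--             for code, col in valid_code_column_map.items() if col == column]}
--         for column in columns}}
-- ===== Notes on version B (the rewrite author's own statement) =====
-- stated objective: alternative
-- what changed: B drops A's mutated bucket dict (pre-create an empty bucket per column, then append into it pair by pair) and instead computes the distinct columns in first-occurrence order and builds the whole result immutably as a nested comprehension that re-scans the column map once per distinct column (group-by via per-column filtering instead of bucket updates); the code->status map is built with dict(zip(...)) instead of an index-range comprehension.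
import Mathlib
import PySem

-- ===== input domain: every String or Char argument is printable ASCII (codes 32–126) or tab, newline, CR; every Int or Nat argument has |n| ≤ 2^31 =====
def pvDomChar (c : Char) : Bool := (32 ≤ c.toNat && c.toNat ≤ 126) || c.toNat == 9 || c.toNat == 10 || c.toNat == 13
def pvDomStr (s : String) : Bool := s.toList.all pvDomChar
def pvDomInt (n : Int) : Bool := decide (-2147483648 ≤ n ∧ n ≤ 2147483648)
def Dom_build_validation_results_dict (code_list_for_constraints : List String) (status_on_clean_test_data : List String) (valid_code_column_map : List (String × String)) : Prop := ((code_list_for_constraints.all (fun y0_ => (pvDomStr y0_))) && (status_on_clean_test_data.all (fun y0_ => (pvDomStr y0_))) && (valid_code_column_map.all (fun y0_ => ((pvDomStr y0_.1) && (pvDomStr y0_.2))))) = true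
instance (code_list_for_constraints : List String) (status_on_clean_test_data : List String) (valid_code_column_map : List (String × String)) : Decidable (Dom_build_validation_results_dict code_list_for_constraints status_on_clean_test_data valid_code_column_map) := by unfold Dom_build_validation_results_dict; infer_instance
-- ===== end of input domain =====

-- B drops A's mutated bucket dict (pre-created empty buckets filled pair by pair) and builds the
-- result immutably: distinct columns in first-occurrence order, then one filtering comprehension
-- per distinct column; objective: alternative (group-by via per-column scans, no speed claim).

-- ===== PORT A =====
-- cl[i]/sd[i] are in range for every i of the comprehension's range under Pre_, ported as pyGetD with default "";
-- code_status_map[code] would raise KeyError for a code outside code_list_for_constraints — excluded by Pre_, ported as getD "".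
-- The []-lookups at "results"/column/"code" always find their key (every column was pre-inserted), ported as Dict.modify.
def build_validation_results_dict (code_list_for_constraints : List String) (status_on_clean_test_data : List String) (valid_code_column_map : List (String × String)) : List (String × List (String × List (String × List (List String)))) :=
  let code_status_map : PySem.Dict String String :=
    (PySem.List.pyRange 0 (PySem.List.len code_list_for_constraints) 1).foldl
      (fun d i => d.insert (PySem.List.pyGetD code_list_for_constraints i "")
                           (PySem.List.pyGetD status_on_clean_test_data i "")) PySem.Dict.empty
  let inner_results : PySem.Dict String (PySem.Dict String (List (List String))) :=
    (valid_code_column_map.map Prod.snd).foldl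
      (fun r column => r.insert column (PySem.Dict.ofList [("code", ([] : List (List String)))]))
      PySem.Dict.empty
  let filled :=
    valid_code_column_map.foldl (fun r p =>
      r.modify p.2 PySem.Dict.empty (fun inner =>
        inner.modify "code" [] (fun l =>
          l ++ [[p.1, if code_status_map.getD p.1 "" = "Success" then "Passed" else "Failed"]])))
      inner_results
  [("results", filled.items.map (fun q => (q.1, q.2.items)))]

-- ===== PORT B =====
-- code_status_map[code] would raise KeyError for a code outside the zip — excluded by Pre_, ported as getD "";
-- the 'if column not in columns: columns.append(column)' loop is the foldl below; the conditional
-- list comprehension is ported as filter-then-map.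
def build_validation_results_dict_alt (code_list_for_constraints : List String) (status_on_clean_test_data : List String) (valid_code_column_map : List (String × String)) : List (String × List (String × List (String × List (List String)))) :=
  let code_status_map : PySem.Dict String String :=
    PySem.Dict.ofList (code_list_for_constraints.zip status_on_clean_test_data)
  let columns : List String :=
    (valid_code_column_map.map Prod.snd).foldl
      (fun cols column => if column ∈ cols then cols else cols ++ [column]) []
  [("results", columns.map (fun column =>
    (column, [("code",
      (valid_code_column_map.filter (fun p => p.2 == column)).map (fun p =>
        [p.1, if code_status_map.getD p.1 "" = "Success" then "Passed" else "Failed"]))])))]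

-- ===== PRECONDITION & SPEC =====
-- Pre_ excludes exactly the inputs where the Python A raises: an IndexError when the status list is
-- shorter than the code list, and a KeyError when some key of valid_code_column_map is not a code of
-- code_list_for_constraints; it also requires the association list standing for the Python dict
-- valid_code_column_map to have distinct keys, as every real Python dict does.
def Pre_build_validation_results_dict (code_list_for_constraints : List String) (status_on_clean_test_data : List String) (valid_code_column_map : List (String × String)) : Prop :=
  code_list_for_constraints.length ≤ status_on_clean_test_data.length ∧
  (valid_code_column_map.map Prod.fst).Nodup ∧
  ∀ p ∈ valid_code_column_map, p.1 ∈ code_list_for_constraints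
instance (code_list_for_constraints : List String) (status_on_clean_test_data : List String) (valid_code_column_map : List (String × String)) : Decidable (Pre_build_validation_results_dict code_list_for_constraints status_on_clean_test_data valid_code_column_map) := by unfold Pre_build_validation_results_dict; infer_instance

def pvWitness_build_validation_results_dict : List String × List String × (List (String × String)) :=
  (["c1", "c2"], ["Success", "Fail"], [("c1", "colA"), ("c2", "colA")])

def Spec_build_validation_results_dict (code_list_for_constraints : List String) (status_on_clean_test_data : List String) (valid_code_column_map : List (String × String)) (out : List (String × List (String × List (String × List (List String))))) : Prop := out = build_validation_results_dict_alt code_list_for_constraints status_on_clean_test_data valid_code_column_map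
instance (code_list_for_constraints : List String) (status_on_clean_test_data : List String) (valid_code_column_map : List (String × String)) (out : List (String × List (String × List (String × List (List String))))) : Decidable (Spec_build_validation_results_dict code_list_for_constraints status_on_clean_test_data valid_code_column_map out) := by
  unfold Spec_build_validation_results_dict
  letI i5 : DecidableEq (List (String × List (String × List (List String)))) := instDecidableEqList
  letI i6 : DecidableEq (String × List (String × List (String × List (List String)))) := instDecidableEqProd
  letI i7 : DecidableEq (List (String × List (String × List (String × List (List String))))) := instDecidableEqList
  exact i7 out (build_validation_results_dict_alt code_list_for_constraints status_on_clean_test_data valid_code_column_map)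

-- ===== CLAIM (what is proved, stated in full; the proofs are below) =====
def Claim_equal_build_validation_results_dict : Prop := ∀ (code_list_for_constraints : List String) (status_on_clean_test_data : List String) (valid_code_column_map : List (String × String)), Dom_build_validation_results_dict code_list_for_constraints status_on_clean_test_data valid_code_column_map → Pre_build_validation_results_dict code_list_for_constraints status_on_clean_test_data valid_code_column_map → Spec_build_validation_results_dict code_list_for_constraints status_on_clean_test_data valid_code_column_map (build_validation_results_dict code_list_for_constraints status_on_clean_test_data valid_code_column_map)

-- ===== LEMMAS AND PROOFS =====

-- The pairs produced by the index comprehension are exactly zip (when the status list is long enough).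
theorem pv_pairs_eq (cl sd : List String) (h : cl.length ≤ sd.length) :
    (PySem.List.pyRange 0 (PySem.List.len cl) 1).map
      (fun i => (PySem.List.pyGetD cl i "", PySem.List.pyGetD sd i "")) = cl.zip sd := by
  apply List.ext_getElem
  · simp [PySem.List.length_pyRange_one, PySem.List.len]; omega
  · intro k h1 h2
    have hk : k < cl.length := by
      simpa [PySem.List.length_pyRange_one, PySem.List.len] using h1
    have hk' : k < sd.length := lt_of_lt_of_le hk h
    simp only [List.getElem_map, List.getElem_zip]
    rw [PySem.List.getElem_pyRange_one]
    simp [PySem.List.pyGetD_of_nonneg, hk, hk']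

-- A's range-indexed insert loop builds the same dict as dict(zip(cl, sd)).
theorem pv_csm_eq (cl sd : List String) (h : cl.length ≤ sd.length) :
    (PySem.List.pyRange 0 (PySem.List.len cl) 1).foldl
      (fun d i => d.insert (PySem.List.pyGetD cl i "") (PySem.List.pyGetD sd i "")) PySem.Dict.empty
      = PySem.Dict.ofList (cl.zip sd) := by
  have h1 := List.foldl_map (f := fun i => (PySem.List.pyGetD cl i "", PySem.List.pyGetD sd i ""))
    (g := fun (d : PySem.Dict String String) (p : String × String) => d.insert p.1 p.2)
    (l := PySem.List.pyRange 0 (PySem.List.len cl) 1) (init := PySem.Dict.empty)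
  rw [← h1, pv_pairs_eq cl sd h]
  rfl

-- B's 'if column not in columns: append' fold is exactly set(…) first-occurrence dedup.
theorem pv_columns_eq (xs : List String) :
    xs.foldl (fun cols column => if column ∈ cols then cols else cols ++ [column]) []
      = PySem.Set.ofList xs := by
  rw [PySem.Set.ofList_eq_foldl]
  have hstep : (fun (cols : List String) column => if column ∈ cols then cols else cols ++ [column])
      = PySem.Set.add := by
    funext s x
    simp [PySem.Set.add, PySem.Set.contains]
  rw [hstep]

-- Dict.modify is insert of the updated value (definitional), so get? of a modify is an if.
theorem pv_get?_modify {ν : Type} (d : PySem.Dict String ν) (k c : String) (e0 : ν) (f : ν → ν) :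
    (d.modify k e0 f).get? c = if c = k then some (f ((d.get? k).getD e0)) else d.get? c := by
  show (d.insert k (f (d.getD k e0))).get? c = _
  rw [PySem.Dict.get?_insert, PySem.Dict.getD_eq_get?_getD]

-- Lookup after A's fill loop: the bucket at c collects the updates of the pairs whose column is c.
theorem pv_get?_fold_modify {ν : Type} (e0 : ν) (upd : (String × String) → ν → ν) :
    ∀ (l : List (String × String)) (r : PySem.Dict String ν) (c : String),
      (l.foldl (fun r p => r.modify p.2 e0 (upd p)) r).get? c
        = (l.filter (fun p => p.2 == c)).foldl (fun b p => some (upd p (b.getD e0))) (r.get? c) := by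
  intro l
  induction l with
  | nil => intro r c; simp
  | cons p t ih =>
    intro r c
    simp only [List.foldl_cons, List.filter_cons]
    by_cases hc : p.2 = c
    · simp only [hc, beq_self_eq_true, if_pos, List.foldl_cons]
      rw [ih, pv_get?_modify, if_pos rfl]
    · have hb : (p.2 == c) = false := by simp [hc]
      simp only [hb, Bool.false_eq_true, ite_false]
      rw [ih, pv_get?_modify, if_neg (fun hh => hc hh.symm)]

-- A fold of some-producing steps starting from some v is some of the plain fold.
theorem pv_foldl_some {ν : Type} (d0 : ν) (upd : (String × String) → ν → ν) :
    ∀ (fl : List (String × String)) (v : ν),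
      fl.foldl (fun b p => some (upd p (b.getD d0))) (some v) = some (fl.foldl (fun v p => upd p v) v) := by
  intro fl
  induction fl with
  | nil => intro v; rfl
  | cons q t ih => intro v; simp only [List.foldl_cons, Option.getD_some]; exact ih _

-- The bucket-initialisation loop: every pre-inserted column holds the constant b0.
theorem pv_get?_fold_insert_const {ν : Type} (b0 : ν) :
    ∀ (cols : List String) (r : PySem.Dict String ν) (c : String),
      (c ∈ cols ∨ r.get? c = some b0) →
      (cols.foldl (fun r col => r.insert col b0) r).get? c = some b0 := by
  intro cols
  induction cols with
  | nil => intro r c h; simpa using h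
  | cons col t ih =>
    intro r c h
    simp only [List.foldl_cons]
    by_cases hc : c ∈ t
    · exact ih _ _ (Or.inl hc)
    · refine ih _ _ (Or.inr ?_)
      rw [PySem.Dict.get?_insert]
      rcases h with h | h
      · rcases List.mem_cons.mp h with h | h
        · rw [if_pos h]
        · exact absurd h hc
      · split <;> [rfl; exact h]

theorem pv_set_update_of_subset (s xs : List String) (h : ∀ x ∈ xs, x ∈ s) :
    PySem.Set.update s xs = s := by
  rw [PySem.Set.update_eq_append_filter]
  have : List.filter (fun y => !PySem.Set.contains s y) (PySem.Set.ofList xs) = [] := by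
    rw [List.filter_eq_nil_iff]
    intro a ha
    have : a ∈ s := h a ((PySem.Set.mem_ofList xs a).mp ha)
    simpa using this
  rw [this, List.append_nil]

-- A's inner 'code' bucket: modifying the singleton dict at its only key rewrites the value in place.
theorem pv_modify_singleton (acc : List (List String)) (f : List (List String) → List (List String)) :
    (PySem.Dict.ofList [("code", acc)]).modify "code" [] f = PySem.Dict.ofList [("code", f acc)] := by
  apply PySem.Dict.ext
  show (PySem.Dict.insert _ "code" _).items = _
  rw [PySem.Dict.items_insert_of_contains]
  · simp [PySem.Dict.getD_eq_get?_getD]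
    rfl
  · rfl

-- A's fill of one bucket, pair by pair, is the mapped filter appended to the start value.
theorem pv_inner_fold (entry : (String × String) → List String) :
    ∀ (fl : List (String × String)) (acc : List (List String)),
      fl.foldl (fun (inner : PySem.Dict String (List (List String))) p =>
          inner.modify "code" [] (fun l => l ++ [entry p])) (PySem.Dict.ofList [("code", acc)])
        = PySem.Dict.ofList [("code", acc ++ fl.map entry)] := by
  intro fl
  induction fl with
  | nil => intro acc; simp
  | cons p t ih =>
    intro acc
    simp only [List.foldl_cons, List.map_cons]
    rw [pv_modify_singleton, ih]
    simp

-- ===== VERDICT (by name: the statement is the Claim_ definition above) =====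
theorem build_validation_results_dict_spec : Claim_equal_build_validation_results_dict := by
  intro cl sd vm _hdom hpre
  obtain ⟨hlen, _hnodup, _hmem⟩ := hpre
  unfold Spec_build_validation_results_dict
  simp only [build_validation_results_dict, build_validation_results_dict_alt]
  rw [pv_csm_eq cl sd hlen, pv_columns_eq]
  set entry : (String × String) → List String := fun p =>
    [p.1, if (PySem.Dict.ofList (cl.zip sd)).getD p.1 "" = "Success" then "Passed" else "Failed"]
  set b0 : PySem.Dict String (List (List String)) := PySem.Dict.ofList [("code", [])] with hb0
  set init := (vm.map Prod.snd).foldl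
      (fun (r : PySem.Dict String (PySem.Dict String (List (List String)))) column => r.insert column b0)
      PySem.Dict.empty with hinit
  set filled := vm.foldl (fun r p =>
      r.modify p.2 PySem.Dict.empty (fun inner : PySem.Dict String (List (List String)) =>
        inner.modify "code" [] (fun l => l ++ [entry p]))) init
    with hfilled
  have hkeysInit : init.keys = PySem.Set.ofList (vm.map Prod.snd) := by
    rw [hinit, PySem.Dict.keys_foldl_insert (f := fun _ _ => b0), PySem.Dict.keys_empty]
    exact PySem.Set.update_nil_left _
  have hkeysA : filled.keys = PySem.Set.ofList (vm.map Prod.snd) := by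
    rw [hfilled, PySem.Dict.keys_foldl_modify_key (key := Prod.snd) (d0 := PySem.Dict.empty)
      (f := fun _ p (inner : PySem.Dict String (List (List String))) =>
        inner.modify "code" [] (fun l => l ++ [entry p])),
      hkeysInit, pv_set_update_of_subset]
    intro x hx
    exact (PySem.Set.mem_ofList _ _).mpr hx
  have hnodA : filled.keys.Nodup := by
    rw [hkeysA]; exact PySem.Set.nodup_ofList _
  have hget : ∀ c ∈ PySem.Set.ofList (vm.map Prod.snd),
      filled.getD c b0 = PySem.Dict.ofList [("code", (vm.filter (fun p => p.2 == c)).map entry)] := by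
    intro c hc
    have hcmem : c ∈ vm.map Prod.snd := (PySem.Set.mem_ofList _ _).mp hc
    have h1 : filled.get? c
        = some (PySem.Dict.ofList [("code", (vm.filter (fun p => p.2 == c)).map entry)]) := by
      rw [hfilled, pv_get?_fold_modify, hinit,
        pv_get?_fold_insert_const b0 _ _ _ (Or.inl hcmem),
        pv_foldl_some PySem.Dict.empty
          (fun p (v : PySem.Dict String (List (List String))) =>
            v.modify "code" [] (fun l => l ++ [entry p]))]
      congr 1
      have := pv_inner_fold entry (vm.filter (fun p => p.2 == c)) []
      simpa [hb0] using this
    rw [PySem.Dict.getD_eq_get?_getD, h1]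
    rfl
  rw [PySem.Dict.items_eq_map_keys filled hnodA b0, hkeysA, List.map_map]
  have hmaps : List.map ((fun (q : String × PySem.Dict String (List (List String))) => (q.1, q.2.items))
        ∘ fun k => (k, filled.getD k b0)) (PySem.Set.ofList (vm.map Prod.snd))
      = List.map (fun column =>
          (column, [("code", (vm.filter (fun p => p.2 == column)).map entry)]))
          (PySem.Set.ofList (vm.map Prod.snd)) := by
    apply List.map_congr_left
    intro c hc
    simp only [Function.comp]
    rw [hget c hc]
    rfl
  rw [hmaps]
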